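-- pv_equiv track=rewrite | github.com/YouhuaLi/metamath-turing-machines | misc/goodstein_sequence.py | stein_none_rescursive
-- ===== SOURCE A (Python) =====
-- def log_with_remainder(value, base):
--     log = 0
--     q = base
--     r = 0
--
--     while  q <= value:
--         q = base * q
--         log = log + 1
--
--     r = value - int( q / base )
--     return (log, r)
--
-- def stein_none_rescursive(n,d):
--     s = 0
--     flag_log_phase = True
--     r = n
--     l = []
--     last_s = 0
--     l.append((r, s))
--
--     while len(l) > 0:
--         (r, s) = l.pop()
--         if flag_log_phase:
--             n = r
--             while n > 0:
--                 (n, r) = log_with_remainder(n, d)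
--                 l.append((r, 0))
--             flag_log_phase = False
--             last_s = 0
--         else:
--             if s == 0:
--                 s = last_s
--                 if r < d:
--                     s = (d+1) ** s + r
--                     l.append((r, s))
--                     last_s = 0
--                 else:
--                     s = (d+1) ** s
--                     l.append((r, s))
--                     l.append((r, 0))
--                     flag_log_phase = True
--             else:
--                 s += last_s
--                 last_s = s
--     return s - 1
-- ===== SOURCE B (Python) =====
-- def log_with_remainder(value, base):
--     log = 0
--     q = base
--     r = 0
--
--     while  q <= value:
--         q = base * q
--         log = log + 1
--
--     r = value - int( q / base )
--     return (log, r)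
--
-- def stein_none_rescursive(n, d):
--     def bump(v):
--         # re-evaluate the hereditary base-d representation of v in base d+1:
--         # peel the largest power d^log off v repeatedly, recursing only on the exponent
--         if v <= 0:
--             return 0
--         total = 0
--         while v >= d:
--             log, r = log_with_remainder(v, d)
--             total += (d + 1) ** bump(log)
--             v = r
--         return total + v
--     return bump(n) - 1
-- ===== Notes on version B (the rewrite author's own statement) =====
-- stated objective: simpler
-- what changed: Replaced A's explicit stack machine (frames (r,s), a log/compute phase flag and a last_s accumulator driving one big while loop) by a direct structural recursion bump(v) = (d+1)^bump(log) + bump(rem) that mirrors the hereditary base-d representation, subtracting 1 once at the top; log_with_remainder is kept verbatim.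
import Mathlib
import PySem

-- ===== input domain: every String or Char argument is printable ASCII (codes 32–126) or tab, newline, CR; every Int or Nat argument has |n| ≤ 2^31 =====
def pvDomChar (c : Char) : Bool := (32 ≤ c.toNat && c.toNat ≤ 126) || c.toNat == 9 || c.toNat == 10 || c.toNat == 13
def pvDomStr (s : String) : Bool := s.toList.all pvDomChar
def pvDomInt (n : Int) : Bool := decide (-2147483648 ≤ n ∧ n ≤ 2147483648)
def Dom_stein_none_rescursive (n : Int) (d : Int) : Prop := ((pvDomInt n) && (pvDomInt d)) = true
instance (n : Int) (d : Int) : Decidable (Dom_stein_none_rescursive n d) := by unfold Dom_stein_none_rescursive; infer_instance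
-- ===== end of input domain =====

-- B replaces A's explicit stack machine (flag phases, pushed (r,s) frames, last_s accumulator)
-- by the direct structural recursion bump(v) = (d+1)^bump(log) + bump(rem); objective: simpler.

-- ===== PORT A =====
-- helper log_with_remainder, shared verbatim by both Python sources.
-- the while loop gets a fuel guard for totality only (value.toNat+1 iterations always
-- suffice when 2 ≤ base, i.e. on every call reachable inside Pre_).
def pvLwrLoop (value base : Int) : Nat → Int → Int → Int × Int
  | 0, log, q => (log, q)
  | f + 1, log, q => if q ≤ value then pvLwrLoop value base f (log + 1) (base * q) else (log, q)

def pvLwr (value base : Int) : Int × Int :=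
  let lq := pvLwrLoop value base (value.toNat + 1) 0 base
  -- Python's `int(q/base)` (float division) ported as floor division: exact on every call
  -- reachable inside Pre_, where q = base^(log+1) and the true quotient base^log ≤ value
  -- ≤ 2^31 < 2^53 is exactly representable, so Python's correctly-rounded `/` is exact.
  (lq.1, value - PySem.Int.floordiv lq.2 base)

-- the inner `while n > 0` decomposition loop of A's log phase (fuel guard for totality only;
-- n strictly decreases when 2 ≤ d, so r.toNat+1 iterations always suffice inside Pre_).
def pvDecomp (d : Int) : Nat → Int → List (Int × Int) → List (Int × Int)
  | 0, _, l => l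
  | f + 1, n, l =>
    if n > 0 then
      let nr := pvLwr n d
      pvDecomp d f nr.1 ((nr.2, 0) :: l)
    else l

-- A's main `while len(l) > 0` loop; the stack is represented top-first (append/pop at the head).
-- `(d+1) ** s` is ported with a .toNat exponent: on every state reachable inside Pre_ the
-- exponent last_s is ≥ 0.  Fuel guard for totality only (3*n.toNat+4 steps always suffice
-- inside Pre_, proved below).
def pvLoop (d : Int) : Nat → List (Int × Int) → Bool → Int → Int → Int
  | _, [], _, _, s => s - 1
  | 0, _ :: _, _, _, s => s - 1
  | f + 1, (r, s0) :: rest, flag, last_s, _ =>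
    if flag then
      pvLoop d f (pvDecomp d (r.toNat + 1) r rest) false 0 s0
    else if s0 = 0 then
      if r < d then
        pvLoop d f ((r, (d + 1) ^ last_s.toNat + r) :: rest) false 0 ((d + 1) ^ last_s.toNat + r)
      else
        pvLoop d f ((r, 0) :: (r, (d + 1) ^ last_s.toNat) :: rest) true last_s ((d + 1) ^ last_s.toNat)
    else
      pvLoop d f rest flag (s0 + last_s) (s0 + last_s)

def stein_none_rescursive (n : Int) (d : Int) : Int :=
  pvLoop d (3 * n.toNat + 4) [(n, 0)] true 0 0

-- ===== PORT B =====
-- B's bump: guard for v ≤ 0, then a loop peeling the largest power d^log off v while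
-- recursing only on the exponent log.  Mutual fuel guards for totality only (fuel
-- v.toNat+1 suffices when 2 ≤ d, proved below); exponent bump(log) is ≥ 0, hence .toNat.
mutual
def pvBump (d : Int) (fuel : Nat) (v : Int) : Int :=
  match fuel with
  | 0 => 0
  | f + 1 =>
    if v ≤ 0 then 0
    else pvBumpGo d (f + 1) 0 v
termination_by 2 * fuel + 1

def pvBumpGo (d : Int) (fuel : Nat) (total v : Int) : Int :=
  match fuel with
  | 0 => total + v
  | g + 1 =>
    if v ≥ d then
      pvBumpGo d g (total + (d + 1) ^ (pvBump d g (pvLwr v d).1).toNat) (pvLwr v d).2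
    else total + v
termination_by 2 * fuel
end

def stein_none_rescursive_alt (n : Int) (d : Int) : Int :=
  pvBump d (n.toNat + 1) n - 1

-- ===== PRECONDITION & SPEC =====
-- Pre_ excludes exactly the inputs on which Python A never returns: for n ≥ 1 and d ≤ 1 both
-- the helper's `while q <= value` loop and the hereditary decomposition fail to make progress
-- and A loops forever.  On every input A returns on (n ≤ 0 with any d, and any n with d ≥ 2),
-- Pre_ holds.
def Pre_stein_none_rescursive (n : Int) (d : Int) : Prop := n ≤ 0 ∨ 2 ≤ d
instance (n : Int) (d : Int) : Decidable (Pre_stein_none_rescursive n d) := by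
  unfold Pre_stein_none_rescursive; infer_instance

def pvWitness_stein_none_rescursive : Int × Int := (5, 2)

def Spec_stein_none_rescursive (n : Int) (d : Int) (out : Int) : Prop :=
  out = stein_none_rescursive_alt n d
instance (n : Int) (d : Int) (out : Int) : Decidable (Spec_stein_none_rescursive n d out) := by
  unfold Spec_stein_none_rescursive; infer_instance

-- ===== CLAIM (what is proved, stated in full; the proofs are below) =====
def Claim_equal_stein_none_rescursive : Prop :=
  ∀ (n : Int) (d : Int), Dom_stein_none_rescursive n d → Pre_stein_none_rescursive n d →
    Spec_stein_none_rescursive n d (stein_none_rescursive n d)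

-- ===== LEMMAS AND PROOFS =====

-- the fueled helper loop computes the largest power: given enough fuel it returns
-- (j+L, d^(j+1+L)) with v < d^(j+1+L) and (L = 0 or d^(j+L) ≤ v).
lemma pvLwrLoop_spec (v d : Int) (_hd : 2 ≤ d) :
    ∀ (f j : Nat), v < d ^ (j + 1 + f) →
      ∃ L : Nat, pvLwrLoop v d f (j : Int) (d ^ (j + 1)) = (((j + L : Nat) : Int), d ^ (j + 1 + L)) ∧
        v < d ^ (j + 1 + L) ∧ (L = 0 ∨ d ^ (j + L) ≤ v) := by
  intro f
  induction f with
  | zero =>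
    intro j h
    exact ⟨0, by simp [pvLwrLoop], by simpa using h, Or.inl rfl⟩
  | succ f ih =>
    intro j h
    by_cases hq : d ^ (j + 1) ≤ v
    · have h' : v < d ^ ((j + 1) + 1 + f) := by
        have : (j + 1) + 1 + f = j + 1 + (f + 1) := by omega
        rw [this]; exact h
      obtain ⟨L, hrun, hub, hlb⟩ := ih (j + 1) h'
      refine ⟨L + 1, ?_, ?_, Or.inr ?_⟩
      · have : pvLwrLoop v d (f + 1) (j : Int) (d ^ (j + 1)) =
            pvLwrLoop v d f ((j : Int) + 1) (d * d ^ (j + 1)) := by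
          simp [pvLwrLoop, hq]
        rw [this]
        have e1 : d * d ^ (j + 1) = d ^ ((j + 1) + 1) := by ring
        have e2 : ((j : Int) + 1) = (((j + 1 : Nat)) : Int) := by push_cast; ring
        rw [e1, e2, hrun]
        rw [show j + 1 + L = j + (L + 1) from by omega,
            show j + 1 + 1 + L = j + 1 + (L + 1) from by omega]
      · have : (j + 1) + 1 + L = j + 1 + (L + 1) := by omega
        rw [← this]; exact hub
      · rcases hlb with h0 | hle
        · subst h0; simpa using hq
        · have : (j + 1) + L = j + (L + 1) := by omega
          rw [← this]; exact hle
    · exact ⟨0, by simp [pvLwrLoop, hq], by simpa using (lt_of_not_ge hq), Or.inl rfl⟩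

lemma int_lt_pow_self (v d : Int) (hd : 2 ≤ d) (k : Nat) (hk : v.toNat < k) : v < d ^ k := by
  have h2 : (v.toNat : Int) < 2 ^ k := by
    exact_mod_cast Nat.lt_of_lt_of_le (Nat.lt_two_pow_self) (Nat.pow_le_pow_right (by norm_num) (by omega))
  have hle : v ≤ (v.toNat : Int) := Int.self_le_toNat v
  have : (2 : Int) ^ k ≤ d ^ k := pow_le_pow_left₀ (by norm_num) hd k
  omega

-- characterisation of log_with_remainder on the calls reachable inside Pre_
lemma pvLwr_spec (v d : Int) (hd : 2 ≤ d) (hv : 1 ≤ v) :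
    ∃ L : Nat, pvLwr v d = ((L : Int), v - d ^ L) ∧ d ^ L ≤ v ∧ v < d ^ (L + 1) := by
  have hfuel : v < d ^ (0 + 1 + (v.toNat + 1)) := int_lt_pow_self v d hd _ (by omega)
  obtain ⟨L, hrun, hub, hlb⟩ := pvLwrLoop_spec v d hd (v.toNat + 1) 0 hfuel
  have hdpos : (0 : Int) < d := by omega
  have hrun' : pvLwrLoop v d (v.toNat + 1) 0 d = ((L : Int), d ^ L * d) := by
    have e : d ^ (0 + 1 + L) = d ^ L * d := by
      rw [show 0 + 1 + L = L + 1 from by omega]; ring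
    rw [← e]
    have e2 : ((0 : Nat) : Int) = (0 : Int) := by norm_num
    rw [e2] at hrun
    have e3 : d ^ (0 + 1) = d := by norm_num
    rw [e3] at hrun
    rw [hrun]
    norm_num
  refine ⟨L, ?_, ?_, ?_⟩
  · unfold pvLwr
    rw [hrun']
    simp only
    have : PySem.Int.floordiv (d ^ L * d) d = d ^ L := by
      rw [PySem.Int.floordiv_eq_ediv_of_pos hdpos]
      exact Int.mul_ediv_cancel _ (by omega)
    rw [this]
  · rcases hlb with h0 | hle
    · subst h0; simpa using hv
    · simpa using hle
  · rw [show L + 1 = 0 + 1 + L from by omega]; exact hub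

-- convenient corollaries about the decomposition v = d^L + r
lemma pow_ge_succ (d : Int) (hd : 2 ≤ d) (L : Nat) : (L : Int) + 1 ≤ d ^ L := by
  have : L < 2 ^ L := Nat.lt_two_pow_self
  have h2 : (2 : Int) ^ L ≤ d ^ L := pow_le_pow_left₀ (by norm_num) hd L
  have : (L : Int) < 2 ^ L := by exact_mod_cast Nat.lt_two_pow_self
  omega

-- fuel irrelevance for pvDecomp (2 ≤ d)
lemma pvDecomp_fuel (d : Int) (hd : 2 ≤ d) :
    ∀ (m : Nat) (x : Int), x.toNat = m → ∀ (f g : Nat), m < f → m < g →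
      ∀ l, pvDecomp d f x l = pvDecomp d g x l := by
  intro m
  induction m using Nat.strong_induction_on with
  | _ m ih =>
    intro x hx f g hf hg l
    obtain ⟨f, rfl⟩ : ∃ f', f = f' + 1 := ⟨f - 1, by omega⟩
    obtain ⟨g, rfl⟩ : ∃ g', g = g' + 1 := ⟨g - 1, by omega⟩
    by_cases hpos : x > 0
    · obtain ⟨L, hrun, hle, hub⟩ := pvLwr_spec x d hd (by omega)
      have hLx : (L : Int) < x := by
        have := pow_ge_succ d hd L; omega
      simp only [pvDecomp, hpos, if_pos, hrun]
      exact ih L (by omega) (L : Int) (by simp) f g (by omega) (by omega) _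
    · simp [pvDecomp, hpos]

-- unfoldings of the mutual pair
lemma pvBump_succ (d : Int) (f : Nat) (v : Int) :
    pvBump d (f + 1) v = if v ≤ 0 then 0 else pvBumpGo d (f + 1) 0 v := by
  rw [pvBump]

lemma pvBumpGo_succ (d : Int) (g : Nat) (total v : Int) :
    pvBumpGo d (g + 1) total v =
      (if v ≥ d then
        pvBumpGo d g (total + (d + 1) ^ (pvBump d g (pvLwr v d).1).toNat) (pvLwr v d).2
      else total + v) := by
  rw [pvBumpGo]

-- the accumulator is additive
lemma pvBumpGo_acc (d : Int) :
    ∀ (g : Nat) (total v : Int), pvBumpGo d g total v = total + pvBumpGo d g 0 v := by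
  intro g
  induction g with
  | zero => intro total v; rw [pvBumpGo, pvBumpGo]; ring
  | succ g ih =>
    intro total v
    rw [pvBumpGo_succ, pvBumpGo_succ]
    by_cases h : v ≥ d
    · rw [if_pos h, if_pos h, ih, ih (0 + _)]
      ring
    · rw [if_neg h, if_neg h]; ring

-- a value below the base just exits the loop
lemma pvBumpGo_small (d : Int) (g : Nat) (total v : Int) (h : ¬ v ≥ d) :
    pvBumpGo d g total v = total + v := by
  cases g with
  | zero => rw [pvBumpGo]
  | succ g => rw [pvBumpGo_succ, if_neg h]

lemma pvBumpGo_nonneg (d : Int) (hd : 2 ≤ d) :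
    ∀ (g : Nat) (total v : Int), 0 ≤ total → 0 ≤ v → 0 ≤ pvBumpGo d g total v := by
  intro g
  induction g with
  | zero => intro total v ht hv; rw [pvBumpGo]; omega
  | succ g ih =>
    intro total v ht hv
    rw [pvBumpGo_succ]
    by_cases h : v ≥ d
    · rw [if_pos h]
      obtain ⟨L, hrun, hle, hub⟩ := pvLwr_spec v d hd (by omega)
      have hp : (0 : Int) ≤ (d + 1) ^ (pvBump d g (pvLwr v d).1).toNat := pow_nonneg (by omega) _
      have hpow1 : (1 : Int) ≤ d ^ L := one_le_pow₀ (by omega)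
      have hr0 : 0 ≤ (pvLwr v d).2 := by rw [hrun]; simp; omega
      exact ih _ _ (by omega) hr0
    · rw [if_neg h]; omega

lemma pvBump_nonneg (d : Int) (hd : 2 ≤ d) : ∀ (f : Nat) (x : Int), 0 ≤ pvBump d f x := by
  intro f x
  cases f with
  | zero => rw [pvBump]
  | succ f =>
    rw [pvBump_succ]
    by_cases h : x ≤ 0
    · rw [if_pos h]
    · rw [if_neg h]
      exact pvBumpGo_nonneg d hd _ _ _ (le_refl 0) (by omega)

-- fuel irrelevance for the mutual pair (2 ≤ d), by strong induction on the value
lemma pvBump_fuelPair (d : Int) (hd : 2 ≤ d) :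
    ∀ (m : Nat) (v : Int), v.toNat = m →
      (∀ g g' : Nat, 0 ≤ v → v.toNat ≤ g → v.toNat ≤ g' → pvBumpGo d g 0 v = pvBumpGo d g' 0 v) ∧
      (∀ f f' : Nat, v.toNat ≤ f → 1 ≤ f → v.toNat ≤ f' → 1 ≤ f' → pvBump d f v = pvBump d f' v) := by
  intro m
  induction m using Nat.strong_induction_on with
  | _ m ih =>
    intro v hv
    have hgo : ∀ g g' : Nat, 0 ≤ v → v.toNat ≤ g → v.toNat ≤ g' →
        pvBumpGo d g 0 v = pvBumpGo d g' 0 v := by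
      intro g g' hv0 hg hg'
      by_cases hvd : v ≥ d
      · obtain ⟨L, hrun, hle, hub⟩ := pvLwr_spec v d hd (by omega)
        have hpow1 : (1 : Int) ≤ d ^ L := one_le_pow₀ (by omega)
        have hLv : (L : Int) < v := by have := pow_ge_succ d hd L; omega
        have hr0 : 0 ≤ v - d ^ L := by omega
        have hrv : v - d ^ L ≤ v - 1 := by omega
        obtain ⟨g, rfl⟩ : ∃ g0, g = g0 + 1 := ⟨g - 1, by omega⟩
        obtain ⟨g', rfl⟩ : ∃ g0, g' = g0 + 1 := ⟨g' - 1, by omega⟩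
        rw [pvBumpGo_succ, pvBumpGo_succ, if_pos hvd, if_pos hvd, hrun]
        simp only
        rw [pvBumpGo_acc, pvBumpGo_acc d g' _ _]
        have hbump : pvBump d g (L : Int) = pvBump d g' (L : Int) := by
          refine ((ih ((L : Int)).toNat (by omega) _ rfl).2) g g' (by omega) (by omega)
            (by omega) (by omega)
        have hgo2 : pvBumpGo d g 0 (v - d ^ L) = pvBumpGo d g' 0 (v - d ^ L) := by
          refine ((ih (v - d ^ L).toNat (by omega) _ rfl).1) g g' hr0 (by omega) (by omega)
        rw [hbump, hgo2]
      · rw [pvBumpGo_small d _ _ _ hvd, pvBumpGo_small d _ _ _ hvd]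
    refine ⟨hgo, ?_⟩
    intro f f' hf hf1 hf' hf1'
    obtain ⟨f, rfl⟩ : ∃ f0, f = f0 + 1 := ⟨f - 1, by omega⟩
    obtain ⟨f', rfl⟩ : ∃ f0, f' = f0 + 1 := ⟨f' - 1, by omega⟩
    rw [pvBump_succ, pvBump_succ]
    by_cases h0 : v ≤ 0
    · rw [if_pos h0, if_pos h0]
    · rw [if_neg h0, if_neg h0]
      exact hgo (f + 1) (f' + 1) (by omega) (by omega) (by omega)

lemma pvBump_fuel (d : Int) (hd : 2 ≤ d) (v : Int) (f f' : Nat)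
    (hf : v.toNat ≤ f) (hf1 : 1 ≤ f) (hf' : v.toNat ≤ f') (hf1' : 1 ≤ f') :
    pvBump d f v = pvBump d f' v :=
  ((pvBump_fuelPair d hd v.toNat v rfl).2) f f' hf hf1 hf' hf1'

lemma pvBumpGo_fuel (d : Int) (hd : 2 ≤ d) (v : Int) (hv : 0 ≤ v) (g g' : Nat)
    (hg : v.toNat ≤ g) (hg' : v.toNat ≤ g') :
    pvBumpGo d g 0 v = pvBumpGo d g' 0 v :=
  ((pvBump_fuelPair d hd v.toNat v rfl).1) g g' hv hg hg'

-- bump with canonical fuel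
lemma pvBump_small (d : Int) (_hd : 2 ≤ d) (x : Int) (h0 : 0 ≤ x) (h1 : x < d) :
    pvBump d (x.toNat + 1) x = x := by
  rw [pvBump_succ]
  by_cases hz : x ≤ 0
  · rw [if_pos hz]; omega
  · rw [if_neg hz, pvBumpGo_small d _ _ _ (by omega)]
    ring

lemma pvBump_decompose (d : Int) (hd : 2 ≤ d) (x : Int) (hx : d ≤ x) (L : Nat)
    (hrun : pvLwr x d = ((L : Int), x - d ^ L)) (hle : d ^ L ≤ x) :
    pvBump d (x.toNat + 1) x =
      (d + 1) ^ (pvBump d ((L : Int).toNat + 1) (L : Int)).toNat +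
        pvBump d ((x - d ^ L).toNat + 1) (x - d ^ L) := by
  have hx0 : ¬ x ≤ 0 := by omega
  have hpow1 : (1 : Int) ≤ d ^ L := one_le_pow₀ (by omega)
  have hLx : (L : Int) < x := by have := pow_ge_succ d hd L; omega
  set r := x - d ^ L with hr
  have hr0 : 0 ≤ r := by omega
  have hrx : r ≤ x - 1 := by omega
  rw [pvBump_succ, if_neg hx0, pvBumpGo_succ, if_pos (by omega : x ≥ d), hrun]
  simp only
  rw [pvBumpGo_acc]
  have hb : pvBump d x.toNat ((L : Int)) = pvBump d ((L : Int).toNat + 1) (L : Int) :=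
    pvBump_fuel d hd _ _ _ (by omega) (by omega) (by simp) (by omega)
  have hg : pvBumpGo d x.toNat 0 r = pvBump d (r.toNat + 1) r := by
    by_cases hrz : r ≤ 0
    · rw [pvBumpGo_small d _ _ _ (by omega), pvBump_succ, if_pos hrz]
      omega
    · rw [pvBump_succ, if_neg hrz]
      exact pvBumpGo_fuel d hd r hr0 _ _ (by omega) (by omega)
  rw [hb, hg]
  ring

-- abbreviation used by the machine lemmas: bump at canonical fuel
def pvBv (d v : Int) : Int := pvBump d (v.toNat + 1) v

lemma pvBv_nonneg (d : Int) (hd : 2 ≤ d) (v : Int) : 0 ≤ pvBv d v := pvBump_nonneg d hd _ v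

-- one unfolding of the main loop (cons stack, positive fuel)
lemma pvLoop_cons (d : Int) (f : Nat) (r s0 : Int) (rest : List (Int × Int))
    (flag : Bool) (last_s s : Int) :
    pvLoop d (f + 1) ((r, s0) :: rest) flag last_s s =
      (if flag then
        pvLoop d f (pvDecomp d (r.toNat + 1) r rest) false 0 s0
      else if s0 = 0 then
        if r < d then
          pvLoop d f ((r, (d + 1) ^ last_s.toNat + r) :: rest) false 0 ((d + 1) ^ last_s.toNat + r)
        else
          pvLoop d f ((r, 0) :: (r, (d + 1) ^ last_s.toNat) :: rest) true last_s ((d + 1) ^ last_s.toNat)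
      else
        pvLoop d f rest flag (s0 + last_s) (s0 + last_s)) := rfl

lemma pvLoop_nil (d : Int) (f : Nat) (flag : Bool) (last_s s : Int) :
    pvLoop d f [] flag last_s s = s - 1 := by
  cases f <;> rfl

-- the two machine invariants:
-- ChainP n: processing the frames pushed for the hereditary chain of n turns accumulator 0
-- into bump n and leaves the rest of the stack untouched.
def ChainP (d n : Int) : Prop :=
  0 ≤ n → ∀ (s : Int) (rest : List (Int × Int)),
    ∃ k, k ≤ 3 * n.toNat ∧ ∀ g,
      pvLoop d (k + g) (pvDecomp d (n.toNat + 1) n rest) false 0 s =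
        pvLoop d g rest false (pvBv d n) (if n = 0 then s else pvBv d n)

-- FrameP r: popping a frame (r, 0) with accumulator a ≥ 0 turns the accumulator into
-- (d+1)^a + bump r and leaves the rest of the stack untouched.
def FrameP (d r : Int) : Prop :=
  0 ≤ r → ∀ (a s : Int) (rest : List (Int × Int)), 0 ≤ a →
    ∃ k, k ≤ 3 * r.toNat + 3 ∧ ∀ g,
      pvLoop d (k + g) ((r, 0) :: rest) false a s =
        pvLoop d g rest false ((d + 1) ^ a.toNat + pvBv d r) ((d + 1) ^ a.toNat + pvBv d r)

lemma machine (d : Int) (hd : 2 ≤ d) :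
    ∀ (m : Nat), (∀ n : Int, m = 2 * n.toNat → ChainP d n) ∧
                 (∀ r : Int, m = 2 * r.toNat + 1 → FrameP d r) := by
  intro m
  induction m using Nat.strong_induction_on with
  | _ m ih =>
    constructor
    · -- ChainP
      intro n hm hn s rest
      by_cases h0 : n = 0
      · subst h0
        refine ⟨0, by omega, fun g => ?_⟩
        have e0 : pvBv d 0 = 0 := by
          rw [pvBv]; rw [show (0 : Int).toNat + 1 = 0 + 1 from rfl, pvBump_succ, if_pos (le_refl (0 : Int))]
        simp [pvDecomp, e0]
      · have hn1 : 1 ≤ n := by omega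
        obtain ⟨L, hrun, hle, hub⟩ := pvLwr_spec n d hd hn1
        have hpow1 : (1 : Int) ≤ d ^ L := one_le_pow₀ (by omega)
        have hLn : (L : Int) < n := by have := pow_ge_succ d hd L; omega
        set c := n - d ^ L with hc
        have hc0 : 0 ≤ c := by omega
        have hcn : c < n := by omega
        have hsum : (L : Int) + c + 1 ≤ n := by
          have := pow_ge_succ d hd L; omega
        -- unfold one decomposition step
        have hdec : pvDecomp d (n.toNat + 1) n rest =
            pvDecomp d ((L : Int).toNat + 1) (L : Int) ((c, 0) :: rest) := by
          simp only [pvDecomp, show n > 0 from by omega, if_pos, hrun]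
          exact pvDecomp_fuel d hd (L : Int).toNat _ rfl n.toNat ((L : Int).toNat + 1)
            (by omega) (by omega) _
        obtain ⟨k1, hk1, hrun1⟩ :=
          ((ih (2 * (L : Int).toNat) (by omega)).1 (L : Int) rfl) (by omega) s ((c, 0) :: rest)
        obtain ⟨k2, hk2, hrun2⟩ :=
          ((ih (2 * c.toNat + 1) (by omega)).2 c rfl) hc0 (pvBv d (L : Int))
            (if (L : Int) = 0 then s else pvBv d (L : Int)) rest (pvBv_nonneg d hd _)
        have hLt : ((L : Int)).toNat = L := by simp
        refine ⟨k1 + k2, by omega, fun g => ?_⟩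
        rw [hdec]
        have : k1 + k2 + g = k1 + (k2 + g) := by omega
        rw [this, hrun1, hrun2]
        have hbv : (d + 1) ^ (pvBv d (L : Int)).toNat + pvBv d c = pvBv d n := by
          by_cases hnd : n < d
          · have hL0 : L = 0 := by
              by_contra hL
              have h1L : 1 ≤ L := Nat.one_le_iff_ne_zero.mpr hL
              have : d ^ 1 ≤ d ^ L := pow_le_pow_right₀ (by omega) h1L
              rw [pow_one] at this
              omega
            subst hL0
            have hc1 : c = n - 1 := by rw [hc, pow_zero]
            have e0 : pvBv d ((0 : Nat) : Int) = 0 := by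
              rw [pvBv]
              rw [show (((0 : Nat) : Int)).toNat + 1 = 0 + 1 from rfl, pvBump_succ]
              rw [if_pos (by norm_num : ((0 : Nat) : Int) ≤ 0)]
            have ec : pvBv d c = c := pvBump_small d hd c hc0 (by omega)
            have en : pvBv d n = n := pvBump_small d hd n (by omega) hnd
            rw [e0, ec, en]
            simp
            omega
          · rw [pvBv, pvBv, pvBv, ← pvBump_decompose d hd n (by omega) L hrun hle]
        rw [hbv]
        simp [h0]
    · -- FrameP
      intro r hm hr a s rest ha
      by_cases hrd : r < d
      · -- small remainder: two steps
        refine ⟨2, by omega, fun g => ?_⟩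
        have e : 2 + g = (g + 1) + 1 := by omega
        have hw : (0 : Int) < (d + 1) ^ a.toNat + r := by
          have : (1 : Int) ≤ (d + 1) ^ a.toNat := one_le_pow₀ (by omega)
          omega
        rw [e, pvLoop_cons, if_neg (by simp : ¬ (false = true)), if_pos rfl, if_pos hrd]
        rw [pvLoop_cons, if_neg (by simp : ¬ (false = true)),
            if_neg (by omega : ¬ ((d + 1) ^ a.toNat + r = 0))]
        rw [pvBv, pvBump_small d hd r hr hrd]
        simp
      · -- big remainder: re-decompose r
        have hr2 : d ≤ r := by omega
        obtain ⟨k1, hk1, hrun1⟩ := ((ih (2 * r.toNat) (by omega)).1 r rfl) hr 0 ((r, (d + 1) ^ a.toNat) :: rest)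
        refine ⟨k1 + 3, by omega, fun g => ?_⟩
        have e : k1 + 3 + g = ((k1 + (g + 1)) + 1) + 1 := by omega
        have hp1 : (1 : Int) ≤ (d + 1) ^ a.toNat := one_le_pow₀ (by omega)
        have hrne : ¬ (r = 0) := by omega
        rw [e, pvLoop_cons, if_neg (by simp : ¬ (false = true)), if_pos rfl, if_neg hrd]
        rw [pvLoop_cons, if_pos rfl, hrun1, if_neg hrne]
        rw [pvLoop_cons, if_neg (by simp : ¬ (false = true)),
            if_neg (by omega : ¬ ((d + 1) ^ a.toNat = 0))]

-- ===== VERDICT (by name: the statement is the Claim_ definition above) =====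
theorem stein_none_rescursive_spec : Claim_equal_stein_none_rescursive := by
  intro n d _ hpre
  unfold Spec_stein_none_rescursive stein_none_rescursive stein_none_rescursive_alt
  by_cases hn : n ≤ 0
  · -- empty chain: A pops (n,0), pushes nothing, returns 0 - 1
    have hnt : n.toNat = 0 := by omega
    have hdec : pvDecomp d (n.toNat + 1) n [] = [] := by
      rw [hnt]
      simp [pvDecomp, show ¬ (n > 0) from by omega]
    rw [hnt]
    have e : 3 * 0 + 4 = 3 + 1 := by omega
    rw [e, pvLoop_cons]
    rw [if_pos (rfl : (true : Bool) = true)]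
    rw [hdec, pvLoop_nil]
    rw [pvBump_succ, if_pos hn]
  · have hd : 2 ≤ d := by
      rcases hpre with h | h
      · omega
      · exact h
    have hn1 : 1 ≤ n := by omega
    obtain ⟨k, hk, hrunc⟩ := ((machine d hd (2 * n.toNat)).1 n rfl) (by omega) 0 []
    have e : 3 * n.toNat + 4 = 1 + (k + (3 * n.toNat + 3 - k)) := by omega
    rw [e]
    have e2 : 1 + (k + (3 * n.toNat + 3 - k)) = (k + (3 * n.toNat + 3 - k)) + 1 := by omega
    rw [e2, pvLoop_cons]
    rw [if_pos (rfl : (true : Bool) = true)]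
    rw [hrunc, pvLoop_nil]
    simp [show ¬ (n = 0) from by omega, pvBv]
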